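-- pv_equiv track=rewrite | github.com/Zhiyu-Chen/Machine-Learning-Evaluation-Ontology | extract_top_entities.py | extract_TDM_triples
-- ===== SOURCE A (Python) =====
-- def extract_TDM_triples(section,predicted_tags):
--     i=0
--     tasks=[]
--     datasets=[]
--     metrics=[]
--
--     while i<len(section):
--         task=[]
--         dataset=[]
--         metric=[]
--         if predicted_tags[i]=="task":
--             task.append(section[i].replace("<punct>",''))
--             while i<len(section)-1 and predicted_tags[i+1]=="task":
--                 i+=1
--                 task.append(section[i].replace("<punct>",''))
--
--             task=" ".join(task)
--             tasks.append(task)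
--
--         #if i==len(section):
--         #    break
--
--         if predicted_tags[i]=="dataset":
--             dataset.append(section[i].replace("<punct>",''))
--             while i<len(section)-1 and predicted_tags[i+1]=="dataset":
--                 i+=1
--                 dataset.append(section[i].replace("<punct>",''))
--             dataset=" ".join(dataset)
--             datasets.append(dataset)
--
--         #if i==len(section):
--         #    break
--
--         if predicted_tags[i]=="metric":
--             metric.append(section[i].replace("<punct>",''))
--             while i<len(section)-1 and predicted_tags[i+1]=="metric":
--                 i+=1
--                 metric.append(section[i].replace("<punct>",''))
--             metric=" ".join(metric)
--             metrics.append(metric)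
--         i+=1
--
--     return tasks,datasets,metrics
-- ===== SOURCE B (Python) =====
-- def extract_TDM_triples(section, predicted_tags):
--     tasks, datasets, metrics = [], [], []
--     dest = {"task": tasks, "dataset": datasets, "metric": metrics}
--     cur_tag = None
--     cur_words = []
--     for i in range(len(section)):
--         tag, word = predicted_tags[i], section[i]
--         if tag == cur_tag:
--             cur_words.append(word)
--         else:
--             if cur_tag in dest:
--                 dest[cur_tag].append(" ".join(w.replace("<punct>", "") for w in cur_words))
--             cur_tag, cur_words = tag, [word]
--     if cur_tag in dest:
--         dest[cur_tag].append(" ".join(w.replace("<punct>", "") for w in cur_words))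
--     return tasks, datasets, metrics
-- ===== Notes on version B (the rewrite author's own statement) =====
-- stated objective: idiomatic
-- what changed: Replaces A's index-jumping outer while with three duplicated per-tag inner whiles and sequential if blocks by a single flush-on-tag-change pass: one loop keeps the pending run (cur_tag, cur_words) and a dict dispatches each finished run to tasks/datasets/metrics.
import Mathlib
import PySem

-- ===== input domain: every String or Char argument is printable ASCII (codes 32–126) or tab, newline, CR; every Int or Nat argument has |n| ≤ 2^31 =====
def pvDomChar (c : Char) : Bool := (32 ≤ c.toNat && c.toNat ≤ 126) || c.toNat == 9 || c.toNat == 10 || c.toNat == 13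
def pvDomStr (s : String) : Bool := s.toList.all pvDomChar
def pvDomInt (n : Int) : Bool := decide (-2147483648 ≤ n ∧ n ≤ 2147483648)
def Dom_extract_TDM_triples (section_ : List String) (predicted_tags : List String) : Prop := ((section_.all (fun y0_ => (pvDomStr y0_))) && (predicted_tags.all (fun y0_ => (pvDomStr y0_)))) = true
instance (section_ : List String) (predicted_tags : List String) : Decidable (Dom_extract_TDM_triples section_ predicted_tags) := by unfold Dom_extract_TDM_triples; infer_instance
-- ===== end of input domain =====

-- B replaces A's index-jumping while loops (three duplicated per-tag inner scans + sequential ifs)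
-- by a single flush-on-tag-change pass with a pending run; equivalence of return values on Pre_.

-- shared by both ports: s.replace("<punct>", "")
def pvRepl (s : String) : String := PySem.Str.replace s "<punct>" ""

-- ===== PORT A =====
-- inner `while i<len(section)-1 and predicted_tags[i+1]==t: i+=1; acc.append(section[i].replace(...))`
-- (fuel = section length always suffices; indexing via getD is exact wherever Python does not raise)
def pvInner (section_ predicted_tags : List String) (t : String) : Nat → Nat → List String → List String × Nat
  | 0, i, acc => (acc, i)
  | fuel+1, i, acc =>
    if i + 1 < section_.length && (predicted_tags.getD (i+1) "" == t) then
      pvInner section_ predicted_tags t fuel (i+1) (acc ++ [pvRepl (section_.getD (i+1) "")])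
    else (acc, i)

-- outer `while i<len(section)` with the three sequential if-blocks, i threaded through
def pvOuter (section_ predicted_tags : List String) : Nat → Nat → List String × List String × List String → List String × List String × List String
  | 0, _, acc => acc
  | fuel+1, i, (tasks, datasets, metrics) =>
    if i < section_.length then
      let p1 :=
        if predicted_tags.getD i "" == "task" then
          let r := pvInner section_ predicted_tags "task" section_.length i [pvRepl (section_.getD i "")]
          (tasks ++ [PySem.Str.join " " r.1], r.2)
        else (tasks, i)
      let p2 :=
        if predicted_tags.getD p1.2 "" == "dataset" then
          let r := pvInner section_ predicted_tags "dataset" section_.length p1.2 [pvRepl (section_.getD p1.2 "")]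
          (datasets ++ [PySem.Str.join " " r.1], r.2)
        else (datasets, p1.2)
      let p3 :=
        if predicted_tags.getD p2.2 "" == "metric" then
          let r := pvInner section_ predicted_tags "metric" section_.length p2.2 [pvRepl (section_.getD p2.2 "")]
          (metrics ++ [PySem.Str.join " " r.1], r.2)
        else (metrics, p2.2)
      pvOuter section_ predicted_tags fuel (p3.2 + 1) (p1.1, p2.1, p3.1)
    else (tasks, datasets, metrics)

def extract_TDM_triples (section_ : List String) (predicted_tags : List String) : List String × List String × List String :=
  pvOuter section_ predicted_tags section_.length 0 ([], [], [])

-- ===== PORT B =====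
-- `if cur_tag in dest: dest[cur_tag].append(" ".join(w.replace(...) for w in cur_words))`
def pvFlush (curTag : Option String) (curWords : List String) (acc : List String × List String × List String) : List String × List String × List String :=
  match curTag with
  | none => acc
  | some t =>
    if t == "task" then (acc.1 ++ [PySem.Str.join " " (curWords.map pvRepl)], acc.2.1, acc.2.2)
    else if t == "dataset" then (acc.1, acc.2.1 ++ [PySem.Str.join " " (curWords.map pvRepl)], acc.2.2)
    else if t == "metric" then (acc.1, acc.2.1, acc.2.2 ++ [PySem.Str.join " " (curWords.map pvRepl)])
    else acc

-- the body of B's `for i in range(len(section))`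
def pvBStep (section_ predicted_tags : List String)
    (st : (Option String × List String) × (List String × List String × List String)) (i : Nat) :
    (Option String × List String) × (List String × List String × List String) :=
  let tag := predicted_tags.getD i ""
  let word := section_.getD i ""
  if some tag == st.1.1 then ((st.1.1, st.1.2 ++ [word]), st.2)
  else ((some tag, [word]), pvFlush st.1.1 st.1.2 st.2)

def extract_TDM_triples_alt (section_ : List String) (predicted_tags : List String) : List String × List String × List String :=
  let fin := (List.range section_.length).foldl (pvBStep section_ predicted_tags) ((none, []), ([], [], []))
  pvFlush fin.1.1 fin.1.2 fin.2

-- ===== PRECONDITION & SPEC =====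
-- Python A raises IndexError at predicted_tags[i] exactly when predicted_tags is shorter than section.
def Pre_extract_TDM_triples (section_ : List String) (predicted_tags : List String) : Prop :=
  section_.length ≤ predicted_tags.length
instance (section_ : List String) (predicted_tags : List String) : Decidable (Pre_extract_TDM_triples section_ predicted_tags) := by unfold Pre_extract_TDM_triples; infer_instance

def pvWitness_extract_TDM_triples : List String × List String :=
  (["img", "net", "on", "cifar<punct>10", "acc"], ["task", "task", "O", "dataset", "metric"])

def Spec_extract_TDM_triples (section_ : List String) (predicted_tags : List String) (out : List String × List String × List String) : Prop := out = extract_TDM_triples_alt section_ predicted_tags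
instance (section_ : List String) (predicted_tags : List String) (out : List String × List String × List String) : Decidable (Spec_extract_TDM_triples section_ predicted_tags out) := by unfold Spec_extract_TDM_triples; infer_instance

-- ===== CLAIM (what is proved, stated in full; the proofs are below) =====
def Claim_equal_extract_TDM_triples : Prop := ∀ (section_ : List String) (predicted_tags : List String), Dom_extract_TDM_triples section_ predicted_tags → Pre_extract_TDM_triples section_ predicted_tags → Spec_extract_TDM_triples section_ predicted_tags (extract_TDM_triples section_ predicted_tags)

-- ===== LEMMAS AND PROOFS =====

-- the (tag, token) pair stream from index i on; both programs are folds over it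
def pvPairs (section_ predicted_tags : List String) (i : Nat) : List (String × String) :=
  (List.range' i (section_.length - i)).map (fun j => (predicted_tags.getD j "", section_.getD j ""))

-- maximal consecutive same-tag runs (the common spec both loops compute)
def pvGroups : List (String × String) → List (String × List String)
  | [] => []
  | (t, w) :: r =>
      (t, w :: (r.takeWhile (fun p => p.1 == t)).map Prod.snd) :: pvGroups (r.dropWhile (fun p => p.1 == t))
termination_by l => l.length
decreasing_by
  have := (List.dropWhile_sublist (l := r) (p := fun p => p.1 == t)).length_le
  simp; omega

def pvFold (gs : List (String × List String)) (acc : List String × List String × List String) : List String × List String × List String :=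
  gs.foldl (fun a g => pvFlush (some g.1) g.2 a) acc

def pvBStep' (st : (Option String × List String) × (List String × List String × List String)) (p : String × String) :
    (Option String × List String) × (List String × List String × List String) :=
  if some p.1 == st.1.1 then ((st.1.1, st.1.2 ++ [p.2]), st.2)
  else ((some p.1, [p.2]), pvFlush st.1.1 st.1.2 st.2)

lemma pvPairs_nil (section_ predicted_tags : List String) (i : Nat) (h : section_.length ≤ i) :
    pvPairs section_ predicted_tags i = [] := by
  simp [pvPairs, Nat.sub_eq_zero_of_le h]

lemma pvPairs_cons (section_ predicted_tags : List String) (i : Nat) (h : i < section_.length) :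
    pvPairs section_ predicted_tags i
      = (predicted_tags.getD i "", section_.getD i "") :: pvPairs section_ predicted_tags (i+1) := by
  have h1 : section_.length - i = (section_.length - (i+1)) + 1 := by omega
  rw [pvPairs, h1, List.range'_succ]
  simp [pvPairs]

lemma pvPairs_drop (section_ predicted_tags : List String) :
    ∀ (m i : Nat), (pvPairs section_ predicted_tags i).drop m = pvPairs section_ predicted_tags (i + m) := by
  intro m
  induction m with
  | zero => intro i; simp
  | succ m ih =>
    intro i
    by_cases h : i < section_.length
    · rw [pvPairs_cons _ _ _ h]
      have : i + (m + 1) = (i + 1) + m := by omega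
      rw [this, ← ih (i+1)]
      rfl
    · rw [pvPairs_nil _ _ _ (by omega), pvPairs_nil _ _ _ (by omega)]
      simp

lemma dropWhile_eq_drop_len {α : Type} (l : List α) (p : α → Bool) :
    l.drop (l.takeWhile p).length = l.dropWhile p := by
  calc l.drop (l.takeWhile p).length
      = ((l.takeWhile p) ++ (l.dropWhile p)).drop (l.takeWhile p).length := by
        rw [List.takeWhile_append_dropWhile]
    _ = l.dropWhile p := List.drop_left

lemma inner_spec (section_ predicted_tags : List String) (t : String) :
    ∀ (fuel i : Nat) (acc : List String),
      section_.length - (i+1) ≤ fuel →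
      (predicted_tags.getD i "" == t) = true →
      pvInner section_ predicted_tags t fuel i acc
        = (acc ++ ((pvPairs section_ predicted_tags (i+1)).takeWhile (fun p => p.1 == t)).map (fun p => pvRepl p.2),
           i + ((pvPairs section_ predicted_tags (i+1)).takeWhile (fun p => p.1 == t)).length)
      ∧ (predicted_tags.getD (i + ((pvPairs section_ predicted_tags (i+1)).takeWhile (fun p => p.1 == t)).length) "" == t) = true := by
  intro fuel
  induction fuel with
  | zero =>
    intro i acc hf ht
    rw [pvPairs_nil _ _ _ (by omega)]
    simpa [pvInner] using ht
  | succ fuel ih =>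
    intro i acc hf ht
    by_cases hlt : i + 1 < section_.length
    · rw [pvPairs_cons _ _ _ hlt]
      by_cases htg : (predicted_tags.getD (i+1) "" == t) = true
      · have := ih (i+1) (acc ++ [pvRepl (section_.getD (i+1) "")]) (by omega) htg
        rw [pvInner]
        simp only [hlt, htg, List.takeWhile_cons, if_pos trivial, decide_true, Bool.and_self]
        simp only [List.map_cons, List.length_cons]
        constructor
        · rw [this.1]
          simp only [List.append_assoc, List.singleton_append]
          congr 1
          omega
        · have h2 := this.2
          have harith : i + 1 + ((pvPairs section_ predicted_tags (i + 1 + 1)).takeWhile (fun p => p.1 == t)).length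
              = i + (((pvPairs section_ predicted_tags (i + 1 + 1)).takeWhile (fun p => p.1 == t)).length + 1) := by omega
          rw [← harith]
          exact h2
      · simp only [Bool.not_eq_true] at htg
        rw [pvInner]
        have hb : (decide (i + 1 < section_.length) && (predicted_tags.getD (i+1) "" == t)) = false := by
          rw [htg, Bool.and_false]
        rw [hb]
        simp only [Bool.false_eq_true, if_false, List.takeWhile_cons, htg]
        simpa using ht
    · rw [pvPairs_nil _ _ _ (by omega)]
      rw [pvInner]
      have hb : (decide (i + 1 < section_.length) && (predicted_tags.getD (i+1) "" == t)) = false := by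
        simp [hlt]
      rw [hb]
      simpa using ht

lemma fold_drop_other (t : String) (h1 : (t == "task") = false) (h2 : (t == "dataset") = false)
    (h3 : (t == "metric") = false) :
    ∀ (l : List (String × String)) (acc : List String × List String × List String),
      pvFold (pvGroups (l.dropWhile (fun p => p.1 == t))) acc = pvFold (pvGroups l) acc := by
  intro l acc
  match l with
  | [] => simp [List.dropWhile]
  | (t2, w2) :: r =>
    by_cases hp : (t2 == t) = true
    · have hpt : t2 = t := by simpa using hp
      subst hpt
      rw [List.dropWhile_cons]
      simp only [hp, if_true]
      conv_rhs => rw [pvGroups, pvFold, List.foldl_cons]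
      have hfl : pvFlush (some t2) (w2 :: (r.takeWhile (fun p => p.1 == t2)).map Prod.snd) acc = acc := by
        simp [pvFlush, h1, h2, h3]
      show pvFold (pvGroups (r.dropWhile fun p => p.1 == t2)) acc
        = List.foldl (fun a g => pvFlush (some g.1) g.2 a)
            (pvFlush (some t2) (w2 :: (r.takeWhile (fun p => p.1 == t2)).map Prod.snd) acc)
            (pvGroups (r.dropWhile fun p => p.1 == t2))
      rw [hfl]
      rfl
    · rw [List.dropWhile_cons]
      simp [hp]

lemma fold_cons_flush (t : String) (ws : List String) (gs : List (String × List String))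
    (acc : List String × List String × List String) :
    pvFold ((t, ws) :: gs) acc = pvFold gs (pvFlush (some t) ws acc) := by
  rw [pvFold, List.foldl_cons]
  rfl

lemma outer_spec (section_ predicted_tags : List String) :
    ∀ (fuel i : Nat) (acc : List String × List String × List String),
      section_.length - i ≤ fuel →
      pvOuter section_ predicted_tags fuel i acc
        = pvFold (pvGroups (pvPairs section_ predicted_tags i)) acc := by
  intro fuel
  induction fuel with
  | zero =>
    intro i acc hf
    rw [pvPairs_nil _ _ _ (by omega)]
    simp [pvOuter, pvGroups, pvFold]
  | succ fuel ih =>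
    intro i acc hf
    obtain ⟨tasks, datasets, metrics⟩ := acc
    by_cases hi : i < section_.length
    · rw [pvPairs_cons _ _ _ hi, pvOuter, if_pos hi]
      rw [pvGroups]
      by_cases h1 : (predicted_tags.getD i "" == "task") = true
      · have hT : predicted_tags.getD i "" = "task" := by simpa using h1
        have hin := inner_spec section_ predicted_tags "task" section_.length i
          [pvRepl (section_.getD i "")] (by omega) h1
        set L := (pvPairs section_ predicted_tags (i+1)).takeWhile
          (fun p => p.1 == "task") with hL
        have hT2 : predicted_tags.getD (i + L.length) "" = "task" := by simpa using hin.2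
        have h2 : (predicted_tags.getD (i + L.length) "" == "dataset") = false := by
          rw [hT2]; decide
        have h3 : (predicted_tags.getD (i + L.length) "" == "metric") = false := by
          rw [hT2]; decide
        have hdw : (pvPairs section_ predicted_tags (i+1)).dropWhile (fun p => p.1 == "task")
            = pvPairs section_ predicted_tags (i + L.length + 1) := by
          rw [← dropWhile_eq_drop_len, ← hL, pvPairs_drop]
          congr 1
          omega
        simp only [h1, if_true, hin.1, h2, h3, Bool.false_eq_true, if_false]
        rw [ih (i + L.length + 1) _ (by omega), hT, ← hL, hdw, fold_cons_flush]
        congr 1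
        rw [pvFlush]
        simp [List.map_map, Function.comp_def]
      · have h1' : (predicted_tags.getD i "" == "task") = false := by
          simpa using h1
        by_cases h2 : (predicted_tags.getD i "" == "dataset") = true
        · have hT : predicted_tags.getD i "" = "dataset" := by simpa using h2
          have hin := inner_spec section_ predicted_tags "dataset" section_.length i
            [pvRepl (section_.getD i "")] (by omega) h2
          set L := (pvPairs section_ predicted_tags (i+1)).takeWhile
            (fun p => p.1 == "dataset") with hL
          have hT2 : predicted_tags.getD (i + L.length) "" = "dataset" := by simpa using hin.2
          have h3 : (predicted_tags.getD (i + L.length) "" == "metric") = false := by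
            rw [hT2]; decide
          have hdw : (pvPairs section_ predicted_tags (i+1)).dropWhile (fun p => p.1 == "dataset")
              = pvPairs section_ predicted_tags (i + L.length + 1) := by
            rw [← dropWhile_eq_drop_len, ← hL, pvPairs_drop]
            congr 1
            omega
          simp only [h1', h2, if_true, hin.1, h3, Bool.false_eq_true, if_false]
          rw [ih (i + L.length + 1) _ (by omega), hT, ← hL, hdw, fold_cons_flush]
          congr 1
          rw [pvFlush]
          simp [List.map_map, Function.comp_def]
        · have h2' : (predicted_tags.getD i "" == "dataset") = false := by
            simpa using h2
          by_cases h3 : (predicted_tags.getD i "" == "metric") = true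
          · have hT : predicted_tags.getD i "" = "metric" := by simpa using h3
            have hin := inner_spec section_ predicted_tags "metric" section_.length i
              [pvRepl (section_.getD i "")] (by omega) h3
            set L := (pvPairs section_ predicted_tags (i+1)).takeWhile
              (fun p => p.1 == "metric") with hL
            have hdw : (pvPairs section_ predicted_tags (i+1)).dropWhile (fun p => p.1 == "metric")
                = pvPairs section_ predicted_tags (i + L.length + 1) := by
              rw [← dropWhile_eq_drop_len, ← hL, pvPairs_drop]
              congr 1
              omega
            simp only [h1', h2', h3, if_true, hin.1, Bool.false_eq_true, if_false]
            rw [ih (i + L.length + 1) _ (by omega), hT, ← hL, hdw, fold_cons_flush]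
            congr 1
            rw [pvFlush]
            simp [List.map_map, Function.comp_def]
          · -- a run of some other tag: A skips one token, B's fold skips the whole group
            have h3' : (predicted_tags.getD i "" == "metric") = false := by
              simpa using h3
            simp only [h1', h2', h3', Bool.false_eq_true, if_false]
            rw [ih (i + 1) _ (by omega), fold_cons_flush]
            have hfl : pvFlush (some (predicted_tags.getD i ""))
                (section_.getD i "" :: ((pvPairs section_ predicted_tags (i+1)).takeWhile
                  (fun p => p.1 == predicted_tags.getD i "")).map Prod.snd)
                (tasks, datasets, metrics) = (tasks, datasets, metrics) := by
              rw [pvFlush]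
              simp only [h1', h2', h3', Bool.false_eq_true, if_false]
            rw [hfl, fold_drop_other _ h1' h2' h3']
    · rw [pvOuter, if_neg hi, pvPairs_nil _ _ _ (by omega)]
      simp [pvGroups, pvFold]

lemma bfold_spec :
    ∀ (l : List (String × String)) (t : String) (ws : List String) (acc : List String × List String × List String),
      (fun fin => pvFlush fin.1.1 fin.1.2 fin.2) (l.foldl pvBStep' ((some t, ws), acc))
        = pvFold ((t, ws ++ (l.takeWhile (fun p => p.1 == t)).map Prod.snd)
                   :: pvGroups (l.dropWhile (fun p => p.1 == t))) acc := by
  intro l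
  induction l with
  | nil =>
    intro t ws acc
    simp [pvFold, pvGroups]
  | cons p r ih =>
    obtain ⟨t2, w2⟩ := p
    intro t ws acc
    by_cases h : (t2 == t) = true
    · rw [List.foldl_cons]
      have hstep : pvBStep' ((some t, ws), acc) (t2, w2) = ((some t, ws ++ [w2]), acc) := by
        simp [pvBStep', h]
      rw [hstep, ih t (ws ++ [w2]) acc]
      simp [h]
    · simp only [Bool.not_eq_true] at h
      rw [List.foldl_cons]
      have hstep : pvBStep' ((some t, ws), acc) (t2, w2)
          = ((some t2, [w2]), pvFlush (some t) ws acc) := by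
        simp [pvBStep', h]
      rw [hstep, ih t2 [w2] (pvFlush (some t) ws acc)]
      rw [List.takeWhile_cons, List.dropWhile_cons]
      simp only [h, Bool.false_eq_true, if_false]
      conv_rhs => rw [pvGroups]
      simp [pvFold]

-- ===== VERDICT (by name: the statement is the Claim_ definition above) =====
theorem extract_TDM_triples_spec : Claim_equal_extract_TDM_triples := by
  intro section_ predicted_tags _hdom _hpre
  unfold Spec_extract_TDM_triples
  rw [extract_TDM_triples, outer_spec section_ predicted_tags section_.length 0 ([], [], []) (by omega)]
  rw [extract_TDM_triples_alt]
  have hbridge : (List.range section_.length).foldl (pvBStep section_ predicted_tags) ((none, []), ([], [], []))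
      = (pvPairs section_ predicted_tags 0).foldl pvBStep' ((none, []), ([], [], [])) := by
    rw [pvPairs, Nat.sub_zero, ← List.range_eq_range', List.foldl_map]
    rfl
  show pvFold (pvGroups (pvPairs section_ predicted_tags 0)) ([], [], [])
    = (fun fin => pvFlush fin.1.1 fin.1.2 fin.2)
        ((List.range section_.length).foldl (pvBStep section_ predicted_tags) ((none, []), ([], [], [])))
  rw [hbridge]
  cases hp : pvPairs section_ predicted_tags 0 with
  | nil =>
    simp [pvGroups, pvFold, pvFlush]
  | cons p r =>
    obtain ⟨t, w⟩ := p
    rw [List.foldl_cons]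
    have hstep : pvBStep' ((none, []), ([], [], [])) (t, w)
        = ((some t, [w]), ([], [], [])) := by
      simp [pvBStep', pvFlush]
    rw [hstep, (bfold_spec r t [w] ([], [], []))]
    rw [pvGroups]
    simp
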